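-- pv_equiv track=rewrite | github.com/Bladetrain3r/MaffStuff | collatz_binary_distance.py | validate_pattern
-- ===== SOURCE A (Python) =====
-- def validate_pattern(binary_string, pattern_type):
--     """
--     Validates if a binary string matches the specified pattern.
--
--     Args:
--         binary_string: String of 1s and 0s
--         pattern_type: 'P', 'M', or 'L'
--
--     Returns:
--         bool: True if the pattern matches, False otherwise
--     """
--     if pattern_type == 'P':
--         return binary_string.startswith('1') and set(binary_string[1:]) == {'0'}
--     elif pattern_type == 'M':
--         return set(binary_string) == {'1'}
--     elif pattern_type == 'L':
--         if not binary_string.endswith('1'):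
--             return False
--         # Check for alternating 10 pattern
--         for i in range(0, len(binary_string)-1, 2):
--             if binary_string[i:i+2] != '10':
--                 return False
--         return True
--     return False
-- ===== SOURCE B (Python) =====
-- def validate_pattern(binary_string, pattern_type):
--     n = len(binary_string)
--     if pattern_type == 'P':
--         return n >= 2 and binary_string == '1' + '0' * (n - 1)
--     if pattern_type == 'M':
--         return n >= 1 and binary_string == '1' * n
--     if pattern_type == 'L':
--         return n % 2 == 1 and binary_string == '10' * (n // 2) + '1'
--     return False
-- ===== Notes on version B (the rewrite author's own statement) =====
-- stated objective: simpler
-- what changed: Replaces A's per-branch machinery (set comparison of characters, suffix test plus an index-stepping chunk loop) with a single closed-form template comparison per pattern: the string must equal '1'+'0'*(n-1), '1'*n, or '10'*(n//2)+'1' with the matching length/parity check.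
import Mathlib
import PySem

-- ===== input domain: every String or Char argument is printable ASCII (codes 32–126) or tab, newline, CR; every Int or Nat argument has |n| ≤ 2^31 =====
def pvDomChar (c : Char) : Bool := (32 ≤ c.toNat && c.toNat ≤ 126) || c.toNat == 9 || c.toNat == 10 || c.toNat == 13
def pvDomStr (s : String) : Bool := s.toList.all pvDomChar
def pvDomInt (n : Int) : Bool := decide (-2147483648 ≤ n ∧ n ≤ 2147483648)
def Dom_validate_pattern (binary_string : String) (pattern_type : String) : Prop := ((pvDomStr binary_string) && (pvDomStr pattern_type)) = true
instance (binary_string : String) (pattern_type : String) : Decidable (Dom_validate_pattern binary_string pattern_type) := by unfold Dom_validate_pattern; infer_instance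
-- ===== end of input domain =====

-- B replaces A's set comparisons and index loop by a single closed-form template comparison per pattern (objective: simpler).

-- ===== PORT A =====
-- the 'for i in range(0, len-1, 2)' loop with early return (exact: strings ported via toList)
def vpLoopA (l : List Char) : List Int → Bool
  | [] => true
  | i :: rest =>
    if PySem.List.slice l (some i) (some (i + 2)) ≠ ['1', '0'] then false
    else vpLoopA l rest

def validate_pattern (binary_string : String) (pattern_type : String) : Bool :=
  let l := binary_string.toList
  if pattern_type == "P" then
    PySem.Chars.startswith l ['1'] &&
      PySem.Set.equal (PySem.Set.ofList (PySem.List.slice l (some 1) none)) (PySem.Set.ofList ['0'])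
  else if pattern_type == "M" then
    PySem.Set.equal (PySem.Set.ofList l) (PySem.Set.ofList ['1'])
  else if pattern_type == "L" then
    if !(PySem.Chars.endswith l ['1']) then false
    else vpLoopA l (PySem.List.pyRange 0 ((l.length : Int) - 1) 2)
  else false

-- ===== PORT B =====
def validate_pattern_alt (binary_string : String) (pattern_type : String) : Bool :=
  let l := binary_string.toList
  let n := l.length
  if pattern_type == "P" then
    decide (2 ≤ n) && (l == '1' :: List.replicate (n - 1) '0')
  else if pattern_type == "M" then
    decide (1 ≤ n) && (l == List.replicate n '1')
  else if pattern_type == "L" then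
    (n % 2 == 1) && (l == (List.replicate (n / 2) ['1', '0']).flatten ++ ['1'])
  else false

-- ===== PRECONDITION & SPEC =====
def Spec_validate_pattern (binary_string : String) (pattern_type : String) (out : Bool) : Prop := out = validate_pattern_alt binary_string pattern_type
instance (binary_string : String) (pattern_type : String) (out : Bool) : Decidable (Spec_validate_pattern binary_string pattern_type out) := by unfold Spec_validate_pattern; infer_instance

-- ===== CLAIM (what is proved, stated in full; the proofs are below) =====
def Claim_equal_validate_pattern : Prop := ∀ (binary_string : String) (pattern_type : String), Dom_validate_pattern binary_string pattern_type → Spec_validate_pattern binary_string pattern_type (validate_pattern binary_string pattern_type)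

-- ===== LEMMAS AND PROOFS =====

lemma vp_single (a : Char) (l : List Char) :
    PySem.Set.equal (PySem.Set.ofList l) (PySem.Set.ofList [a])
    = (decide (1 ≤ l.length) && (l == List.replicate l.length a)) := by
  rw [Bool.eq_iff_iff]
  simp only [PySem.Set.equal_iff, PySem.Set.mem_ofList, Bool.and_eq_true, decide_eq_true_eq,
    beq_iff_eq, List.eq_replicate_iff, List.mem_singleton]
  constructor
  · intro h
    have h1 : a ∈ l := (h a).mpr rfl
    exact ⟨List.length_pos_iff.mpr (by rintro rfl; simp at h1), trivial,
      fun b hb => (h b).mp hb⟩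
  · rintro ⟨hn, -, hall⟩ x
    constructor
    · exact hall x
    · rintro rfl
      rcases l with _ | ⟨c, r⟩
      · simp at hn
      · exact List.mem_cons.mpr (Or.inl (hall c List.mem_cons_self).symm)

lemma vp_P (l : List Char) :
    (PySem.Chars.startswith l ['1'] &&
      PySem.Set.equal (PySem.Set.ofList (PySem.List.slice l (some 1) none)) (PySem.Set.ofList ['0']))
    = (decide (2 ≤ l.length) && (l == '1' :: List.replicate (l.length - 1) '0')) := by
  rw [PySem.List.slice_from_one, vp_single]
  rcases l with _ | ⟨c, r⟩
  · simp [PySem.Chars.startswith]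
  · simp only [List.tail_cons, List.length_cons, Nat.add_sub_cancel]
    rw [Bool.eq_iff_iff]
    simp [PySem.Chars.startswith, List.isPrefixOf, Nat.succ_le_iff, List.length_pos_iff]
    tauto


lemma vpLoopA_eq_all (l : List Char) (idxs : List Int) :
    vpLoopA l idxs = idxs.all (fun i => PySem.List.slice l (some i) (some (i + 2)) == ['1', '0']) := by
  induction idxs with
  | nil => rfl
  | cons i rest ih =>
    simp only [vpLoopA, List.all_cons, ih]
    by_cases h : PySem.List.slice l (some i) (some (i + 2)) = ['1', '0'] <;> simp [h]

lemma pyRange_two_cons (b : Int) (hb : 0 < b) :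
    PySem.List.pyRange 0 b 2 = 0 :: (PySem.List.pyRange 0 (b - 2) 2).map (· + 2) := by
  rw [PySem.List.pyRange_of_pos _ _ (by norm_num), PySem.List.pyRange_of_pos _ _ (by norm_num)]
  by_cases h2 : b ≤ 2
  · have hb1 : ((b - 0 + 2 - 1) / 2).toNat = 1 := by omega
    have hb2 : ¬ 2 < b := by omega
    have hb1' : ((b + 2 - 1) / 2).toNat = 1 := by omega
    simp [hb, hb1', hb2]
  · have hbb : (2:Int) < b := by omega
    have hc : ((b - 0 + 2 - 1) / 2).toNat = ((b - 2 - 0 + 2 - 1) / 2).toNat + 1 := by omega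
    have hbb' : (0:Int) < b - 2 := by omega
    simp only [hb, if_pos, hc, List.range_succ_eq_map, List.map_cons, List.map_map, hbb']
    norm_num
    intro a _
    ring

lemma slice_shift (l : List Char) (i : Int) (hi : 0 ≤ i) :
    PySem.List.slice l (some (i + 2)) (some (i + 2 + 2)) = PySem.List.slice (l.drop 2) (some i) (some (i + 2)) := by
  obtain ⟨m, rfl⟩ := Int.eq_ofNat_of_zero_le hi
  have h1 : (m : Int) + 2 = ((m + 2 : Nat) : Int) := by push_cast; ring
  have h2 : (m : Int) + 2 + 2 = ((m + 2 : Nat) : Int) + ((2 : Nat) : Int) := by push_cast; ring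
  have h3 : (m : Int) + 2 = ((m : Nat) : Int) + ((2 : Nat) : Int) := by push_cast; ring
  rw [h2, h1, PySem.List.slice_natCast_add]
  have h4 : ((m + 2 : Nat) : Int) = ((m : Nat) : Int) + ((2 : Nat) : Int) := by push_cast; ring
  rw [h4, PySem.List.slice_natCast_add]
  simp [List.drop_drop, Nat.add_comm]

lemma ifNotFalse (e x : Bool) : (if !e then false else x) = (e && x) := by cases e <;> simp

lemma loop_shift (c1 c2 : Char) (rest : List Char) :
    vpLoopA (c1 :: c2 :: rest) (PySem.List.pyRange 0 (((c1 :: c2 :: rest).length : Int) - 1) 2)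
    = ((c1 == '1' && c2 == '0') && vpLoopA rest (PySem.List.pyRange 0 ((rest.length : Int) - 1) 2)) := by
  have hb : (0:Int) < ((c1 :: c2 :: rest).length : Int) - 1 := by simp
  rw [pyRange_two_cons _ hb]
  have h3 : (((c1 :: c2 :: rest).length : Int) - 1 - 2) = (rest.length : Int) - 1 := by
    push_cast [List.length_cons]
    omega
  rw [h3, vpLoopA_eq_all, vpLoopA_eq_all, List.all_cons, List.all_map]
  have hhead : PySem.List.slice (c1 :: c2 :: rest) (some 0) (some (0 + 2)) = [c1, c2] := by
    simp [pysem]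
  rw [hhead]
  have htail : (PySem.List.pyRange 0 ((rest.length : Int) - 1) 2).all
        ((fun i => PySem.List.slice (c1 :: c2 :: rest) (some i) (some (i + 2)) == ['1', '0']) ∘ (· + 2))
      = (PySem.List.pyRange 0 ((rest.length : Int) - 1) 2).all
        (fun i => PySem.List.slice rest (some i) (some (i + 2)) == ['1', '0']) := by
    rw [Bool.eq_iff_iff]
    simp only [List.all_eq_true, Function.comp]
    constructor <;> intro h i hi <;> have h0 : 0 ≤ i := ((PySem.List.mem_pyRange_iff_of_pos (by norm_num) i).mp hi).1
    · have hx := h i hi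
      rw [slice_shift _ _ h0] at hx
      exact hx
    · have hs := slice_shift (c1 :: c2 :: rest) i h0
      rw [hs]
      exact h i hi
  rw [htail]
  rw [Bool.eq_iff_iff]
  simp

lemma endswith_cons2 (c1 c2 : Char) (rest : List Char) (h : rest ≠ []) :
    PySem.Chars.endswith (c1 :: c2 :: rest) ['1'] = PySem.Chars.endswith rest ['1'] := by
  rw [Bool.eq_iff_iff]
  simp only [PySem.Chars.endswith_iff, List.suffix_cons_iff]
  constructor
  · rintro (h1 | h1 | h1)
    · exact absurd (congrArg List.length h1) (by simp)
    · exfalso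
      have := congrArg List.length h1
      simp at this
      exact h this
    · exact h1
  · intro h1
    exact Or.inr (Or.inr h1)

lemma vp_L_aux : ∀ (n : Nat) (l : List Char), l.length ≤ n →
    (PySem.Chars.endswith l ['1'] && vpLoopA l (PySem.List.pyRange 0 ((l.length : Int) - 1) 2))
    = ((l.length % 2 == 1) && (l == (List.replicate (l.length / 2) ['1', '0']).flatten ++ ['1'])) := by
  intro n
  induction n with
  | zero =>
    intro l hl
    have : l = [] := List.eq_nil_of_length_eq_zero (by omega)
    subst this
    decide
  | succ m ih =>
    intro l hl
    rcases l with _ | ⟨c1, _ | ⟨c2, rest⟩⟩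
    · decide
    · have hr : PySem.List.pyRange 0 ((([c1] : List Char).length : Int) - 1) 2 = [] := by
        rw [PySem.List.pyRange_of_pos _ _ (by norm_num)]
        simp
      rw [hr]
      rw [Bool.eq_iff_iff]
      simp [PySem.Chars.endswith_iff, List.suffix_cons_iff, vpLoopA]
      exact eq_comm
    · by_cases hre : rest = []
      · subst hre
        rw [loop_shift]
        rw [Bool.eq_iff_iff]
        simp [PySem.Chars.endswith_iff, List.suffix_cons_iff]
        intro h1 _ h2
        exact absurd (h2 ▸ h1) (by decide)
      · have hr2 : rest.length ≤ m := by simp at hl; omega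
        rw [loop_shift, endswith_cons2 _ _ _ hre, Bool.and_left_comm, ih rest hr2]
        simp only [List.length_cons]
        have e1 : (rest.length + 1 + 1) % 2 = rest.length % 2 := by omega
        have e2 : (rest.length + 1 + 1) / 2 = rest.length / 2 + 1 := by omega
        rw [e1, e2, List.replicate_succ, List.flatten_cons]
        rw [Bool.eq_iff_iff]
        simp
        tauto

lemma vp_L (l : List Char) :
    (if !(PySem.Chars.endswith l ['1']) then false
     else vpLoopA l (PySem.List.pyRange 0 ((l.length : Int) - 1) 2))
    = ((l.length % 2 == 1) && (l == (List.replicate (l.length / 2) ['1', '0']).flatten ++ ['1'])) := by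
  rw [ifNotFalse]
  exact vp_L_aux l.length l le_rfl

lemma vp_M (l : List Char) :
    PySem.Set.equal (PySem.Set.ofList l) (PySem.Set.ofList ['1'])
    = (decide (1 ≤ l.length) && (l == List.replicate l.length '1')) := vp_single '1' l

-- ===== VERDICT (by name: the statement is the Claim_ definition above) =====
theorem validate_pattern_spec : Claim_equal_validate_pattern := by
  intro s t _
  unfold Spec_validate_pattern validate_pattern validate_pattern_alt
  by_cases hP : t == "P"
  · simp only [hP, if_pos]; exact vp_P _
  · by_cases hM : t == "M"
    · simp only [hP, hM, if_neg, if_pos, Bool.false_eq_true, not_false_iff]; exact vp_M _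
    · by_cases hL : t == "L"
      · simp only [hP, hM, hL, Bool.false_eq_true, not_false_iff, if_neg, if_pos]; exact vp_L _
      · simp [hP, hM, hL]
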